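-- pv_equiv track=rewrite | github.com/gaboza12/we-are-algorithm | 724thomas/Week3/17352.py | solution
-- ===== SOURCE A (Python) =====
-- def solution(n, edges):
--
--     def find(x):
--         if x != par[x]:
--             par[x] = find(par[x])
--         return par[x]
--
--     def union(a,b):
--         rootA = find(a)
--         rootB = find(b)
--
--         if rootA != rootB:
--             if rootA < rootB:
--                 par[rootB] = rootA
--             else:
--                 par[rootA] = rootB
--
--     par = [i for i in range(n+1)]
--     for u, v in edges:
--         union(u, v)
--     ans = set()
--     for i in range(1, n+1):
--         ans.add(find(i))
--     return list(ans)
-- ===== SOURCE B (Python) =====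
-- def solution(n, edges):
--     # Merge-by-relabelling: keep a label array where lab[i] is the smallest node
--     # known to be in i's component; each edge merges two label classes directly.
--     lab = list(range(n + 1))
--     for u, v in edges:
--         a, b = lab[u], lab[v]
--         if a != b:
--             m = a if a < b else b
--             lab = [m if x == a or x == b else x for x in lab]
--     return list(set(lab[1:]))
-- ===== Notes on version B (the rewrite author's own statement) =====
-- stated objective: simpler
-- what changed: Replaces the recursive union-find with path compression by a flat label array that is merged by relabelling per edge, and replaces the find-per-node set build by deduplicating the label array once.
import Mathlib
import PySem

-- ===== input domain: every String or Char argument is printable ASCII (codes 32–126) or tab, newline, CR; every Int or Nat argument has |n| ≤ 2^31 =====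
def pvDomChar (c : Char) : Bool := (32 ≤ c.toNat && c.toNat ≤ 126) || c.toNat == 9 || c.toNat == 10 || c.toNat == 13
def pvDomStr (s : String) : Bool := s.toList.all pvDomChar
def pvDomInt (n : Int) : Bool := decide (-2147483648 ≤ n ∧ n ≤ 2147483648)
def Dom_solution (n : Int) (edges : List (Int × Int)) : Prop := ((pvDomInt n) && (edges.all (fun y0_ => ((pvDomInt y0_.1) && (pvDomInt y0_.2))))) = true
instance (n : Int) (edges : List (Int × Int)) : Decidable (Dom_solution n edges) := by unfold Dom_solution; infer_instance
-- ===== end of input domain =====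

-- B replaces the recursive union-find (path compression) by per-edge relabelling of a
-- flat label array, deduplicated once at the end: simpler, no recursion (not faster).


-- ===== PORT A =====
-- find(x): path-compressing recursive find; fuel (n+2) only makes the recursion
-- structural — it is never exhausted on inputs satisfying Pre_ (proved below).
def findA : Nat → List Int → Int → List Int × Int
  | 0, par, x => (par, x)
  | f+1, par, x =>
    let px := PySem.List.pyGetD par x 0
    if x ≠ px then
      let r := findA f par px
      (PySem.List.pySetD r.1 x r.2, r.2)
    else (par, px)

def unionA (f : Nat) (par : List Int) (a b : Int) : List Int :=
  let fa := findA f par a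
  let fb := findA f fa.1 b
  if fa.2 ≠ fb.2 then
    if fa.2 < fb.2 then PySem.List.pySetD fb.1 fb.2 fa.2
    else PySem.List.pySetD fb.1 fa.2 fb.2
  else fb.1

def solution (n : Int) (edges : List (Int × Int)) : List Int :=
  let fuel := n.toNat + 2
  let par0 := PySem.List.pyRange 0 (n+1) 1
  let par1 := edges.foldl (fun par uv => unionA fuel par uv.1 uv.2) par0
  let st := (PySem.List.pyRange 1 (n+1) 1).foldl
      (fun (st : List Int × PySem.Set Int) i =>
        let fr := findA fuel st.1 i
        (fr.1, PySem.Set.add st.2 fr.2)) (par1, PySem.Set.empty)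
  st.2

-- ===== PORT B =====
def solution_alt (n : Int) (edges : List (Int × Int)) : List Int :=
  let lab0 := PySem.List.pyRange 0 (n+1) 1
  let lab := edges.foldl (fun lab uv =>
    let a := PySem.List.pyGetD lab uv.1 0
    let b := PySem.List.pyGetD lab uv.2 0
    if a ≠ b then
      let m := if a < b then a else b
      lab.map (fun x => if x = a ∨ x = b then m else x)
    else lab) lab0
  PySem.Set.ofList (PySem.List.slice lab (some 1) none)

-- ===== PRECONDITION & SPEC =====
-- Pre_ is exactly the set of inputs on which the Python A returns: an edge endpoint
-- outside [-(n+1), n] makes A raise IndexError on the (n+1)-cell parent array.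
def Pre_solution (n : Int) (edges : List (Int × Int)) : Prop :=
  ∀ p ∈ edges, (-(n+1) ≤ p.1 ∧ p.1 ≤ n) ∧ (-(n+1) ≤ p.2 ∧ p.2 ≤ n)
instance (n : Int) (edges : List (Int × Int)) : Decidable (Pre_solution n edges) := by unfold Pre_solution; infer_instance
def pvWitness_solution : Int × (List (Int × Int)) := (4, [(1, 2), (2, 3), (0, 4), (-1, 1)])

def Spec_solution (n : Int) (edges : List (Int × Int)) (out : List Int) : Prop := out = solution_alt n edges
instance (n : Int) (edges : List (Int × Int)) (out : List Int) : Decidable (Spec_solution n edges out) := by unfold Spec_solution; infer_instance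

-- ===== CLAIM (what is proved, stated in full; the proofs are below) =====
def Claim_equal_solution : Prop := ∀ (n : Int) (edges : List (Int × Int)), Dom_solution n edges → Pre_solution n edges → Spec_solution n edges (solution n edges)


-- ===== LEMMAS AND PROOFS =====

-- parent value at a Nat index, as a Nat
def pvP (par : List Int) (i : Nat) : Nat := (par.getD i 0).toNat

-- structural invariant of A's parent array: entries are in [0, index]
def pvGood (par : List Int) : Prop :=
  ∀ i : Nat, i < par.length → 0 ≤ par.getD i 0 ∧ par.getD i 0 ≤ (i : Int)

-- pure (non-compressing) root function, with fuel
def pvRootF : Nat → List Int → Nat → Nat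
  | 0, _, i => i
  | f+1, par, i => if pvP par i = i then i else pvRootF f par (pvP par i)

def pvRoot (par : List Int) (i : Nat) : Nat := pvRootF (i+1) par i

-- Python index normalisation for an in-range (possibly negative) index
def pvIdx (len : Nat) (x : Int) : Nat := if x < 0 then (x + len).toNat else x.toNat

theorem pvP_cast (par : List Int) (i : Nat) (hg : pvGood par) (hi : i < par.length) :
    ((pvP par i : Nat) : Int) = par.getD i 0 := Int.toNat_of_nonneg (hg i hi).1

theorem pvP_le (par : List Int) (i : Nat) (hg : pvGood par) (hi : i < par.length) :
    pvP par i ≤ i := by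
  have h := (hg i hi).2
  unfold pvP; omega

theorem pvRootF_mono (par : List Int) (hg : pvGood par) :
    ∀ i, i < par.length → ∀ f g, i < f → i < g → pvRootF f par i = pvRootF g par i := by
  intro i
  induction i using Nat.strong_induction_on with
  | _ i ih =>
    intro hi f g hf hg'
    match f, g with
    | f+1, g+1 =>
      simp only [pvRootF]
      by_cases hp : pvP par i = i
      · simp [hp]
      · have hle := pvP_le par i hg hi
        have hlt : pvP par i < i := lt_of_le_of_ne hle hp
        simp only [hp]
        exact ih _ hlt (lt_of_le_of_lt hle hi) f g (by omega) (by omega)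

theorem pvRoot_unfold (par : List Int) (i : Nat) (hg : pvGood par) (hi : i < par.length) :
    pvRoot par i = if pvP par i = i then i else pvRoot par (pvP par i) := by
  conv_lhs => unfold pvRoot; rw [show i + 1 = i + 1 from rfl]
  show pvRootF (i+1) par i = _
  rw [show pvRootF (i+1) par i = if pvP par i = i then i else pvRootF i par (pvP par i) from rfl]
  by_cases hp : pvP par i = i
  · rw [if_pos hp, if_pos hp]
  · have hle := pvP_le par i hg hi
    have hlt : pvP par i < i := lt_of_le_of_ne hle hp
    rw [if_neg hp, if_neg hp]
    exact pvRootF_mono par hg _ (lt_of_le_of_lt hle hi) i (pvP par i + 1) hlt (by omega)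

theorem pvRoot_of_fix (par : List Int) (i : Nat) (hg : pvGood par) (hi : i < par.length)
    (h : pvP par i = i) : pvRoot par i = i := by
  rw [pvRoot_unfold par i hg hi, if_pos h]

theorem pvRoot_le (par : List Int) (hg : pvGood par) :
    ∀ i, i < par.length → pvRoot par i ≤ i := by
  intro i
  induction i using Nat.strong_induction_on with
  | _ i ih =>
    intro hi
    rw [pvRoot_unfold par i hg hi]
    by_cases hp : pvP par i = i
    · simp [hp]
    · have hle := pvP_le par i hg hi
      have hlt : pvP par i < i := lt_of_le_of_ne hle hp
      simp only [hp]
      exact le_of_lt (lt_of_le_of_lt (ih _ hlt (lt_of_le_of_lt hle hi)) hlt)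

theorem pvRoot_lt (par : List Int) (i : Nat) (hg : pvGood par) (hi : i < par.length) :
    pvRoot par i < par.length := lt_of_le_of_lt (pvRoot_le par hg i hi) hi

theorem pvRoot_fix (par : List Int) (hg : pvGood par) :
    ∀ i, i < par.length → pvP par (pvRoot par i) = pvRoot par i := by
  intro i
  induction i using Nat.strong_induction_on with
  | _ i ih =>
    intro hi
    rw [pvRoot_unfold par i hg hi]
    by_cases hp : pvP par i = i
    · simp [hp]
    · have hle := pvP_le par i hg hi
      have hlt : pvP par i < i := lt_of_le_of_ne hle hp
      simp only [hp]
      exact ih _ hlt (lt_of_le_of_lt hle hi)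

theorem pvRoot_idem (par : List Int) (i : Nat) (hg : pvGood par) (hi : i < par.length) :
    pvRoot par (pvRoot par i) = pvRoot par i :=
  pvRoot_of_fix par _ hg (pvRoot_lt par i hg hi) (pvRoot_fix par hg i hi)

theorem pv_getD_set (par : List Int) (j k : Nat) (v : Int) (hj : j < par.length) :
    (par.set j v).getD k 0 = if k = j then v else par.getD k 0 := by
  by_cases h : k = j
  · subst h
    simp [List.getD, hj]
  · simp [List.getD, List.getElem?_set_ne (by omega : j ≠ k), h]

theorem pvGood_set (par : List Int) (j : Nat) (v : Int) (hg : pvGood par) (hj : j < par.length)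
    (h0 : 0 ≤ v) (hle : v ≤ (j : Int)) : pvGood (par.set j v) := by
  intro k hk
  rw [List.length_set] at hk
  rw [pv_getD_set par j k v hj]
  by_cases h : k = j
  · subst h; simp [h0, hle]
  · simp only [h]; exact hg k hk

theorem pvP_set (par : List Int) (j k : Nat) (v : Int) (hj : j < par.length) :
    pvP (par.set j v) k = if k = j then v.toNat else pvP par k := by
  unfold pvP
  rw [pv_getD_set par j k v hj]
  by_cases h : k = j <;> simp [h]

-- path compression preserves every root
theorem pvRoot_compress (par : List Int) (j : Nat) (hg : pvGood par) (hj : j < par.length) :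
    ∀ k, k < par.length →
      pvRoot (par.set j ((pvRoot par j : Nat) : Int)) k = pvRoot par k := by
  have hr_le : pvRoot par j ≤ j := pvRoot_le par hg j hj
  have hr_lt : pvRoot par j < par.length := pvRoot_lt par j hg hj
  have hgood' : pvGood (par.set j ((pvRoot par j : Nat) : Int)) :=
    pvGood_set par j _ hg hj (by positivity) (by exact_mod_cast hr_le)
  set par' := par.set j ((pvRoot par j : Nat) : Int) with hpar'
  have hlen' : par'.length = par.length := List.length_set ..
  intro k
  induction k using Nat.strong_induction_on with
  | _ k ih =>
    intro hk
    have hp' : pvP par' k = if k = j then pvRoot par j else pvP par k := by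
      rw [hpar', pvP_set par j k _ hj]
      simp
    by_cases hkj : k = j
    · subst hkj
      by_cases hrj : pvRoot par k = k
      · have : pvP par' k = k := by rw [hp']; simp [hrj]
        rw [pvRoot_of_fix par' k hgood' (by omega) this, hrj]
      · have hrlt : pvRoot par k < k := lt_of_le_of_ne hr_le hrj
        have hp'k : pvP par' k = pvRoot par k := by rw [hp']; simp
        rw [pvRoot_unfold par' k hgood' (by omega), hp'k, if_neg hrj]
        rw [ih _ hrlt (by omega)]
        exact pvRoot_idem par k hg hk
    · have hp'k : pvP par' k = pvP par k := by rw [hp']; simp [hkj]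
      by_cases hp : pvP par k = k
      · rw [pvRoot_of_fix par' k hgood' (by omega) (by rw [hp'k, hp]),
            pvRoot_of_fix par k hg hk hp]
      · have hle := pvP_le par k hg hk
        have hlt : pvP par k < k := lt_of_le_of_ne hle hp
        rw [pvRoot_unfold par' k hgood' (by omega), hp'k, if_neg hp,
            pvRoot_unfold par k hg hk, if_neg hp]
        exact ih _ hlt (lt_of_le_of_lt hle hk)

-- linking a larger root under a smaller one redirects exactly that root
theorem pvRoot_link (par : List Int) (a b : Nat) (hg : pvGood par) (ha : a < par.length)
    (hb : b < par.length) (hfa : pvP par a = a) (hfb : pvP par b = b) (hba : b < a) :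
    ∀ k, k < par.length →
      pvRoot (par.set a ((b : Nat) : Int)) k = if pvRoot par k = a then b else pvRoot par k := by
  have hgood' : pvGood (par.set a ((b : Nat) : Int)) :=
    pvGood_set par a _ hg ha (by positivity) (by exact_mod_cast le_of_lt hba)
  set par' := par.set a ((b : Nat) : Int) with hpar'
  have hlen' : par'.length = par.length := List.length_set ..
  intro k
  induction k using Nat.strong_induction_on with
  | _ k ih =>
    intro hk
    have hp' : pvP par' k = if k = a then b else pvP par k := by
      rw [hpar', pvP_set par a k _ ha]
      simp
    by_cases hka : k = a
    · subst hka
      have hrk : pvRoot par k = k := pvRoot_of_fix par k hg hk hfa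
      have hp'k : pvP par' k = b := by rw [hp', if_pos rfl]
      rw [pvRoot_unfold par' k hgood' (by omega), hp'k, if_neg (by omega : ¬ b = k),
          ih b hba (by omega), pvRoot_of_fix par b hg hb hfb,
          if_neg (by omega : ¬ b = k), if_pos hrk]
    · have hp'k : pvP par' k = pvP par k := by rw [hp', if_neg hka]
      by_cases hp : pvP par k = k
      · rw [pvRoot_of_fix par' k hgood' (by omega) (by rw [hp'k, hp]),
            pvRoot_of_fix par k hg hk hp, if_neg hka]
      · have hle := pvP_le par k hg hk
        have hlt : pvP par k < k := lt_of_le_of_ne hle hp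
        rw [pvRoot_unfold par' k hgood' (by omega), hp'k, if_neg hp,
            pvRoot_unfold par k hg hk, if_neg hp]
        exact ih _ hlt (lt_of_le_of_lt hle hk)

theorem pvIdx_lt (len : Nat) (x : Int) (h1 : -(len : Int) ≤ x) (h2 : x < len) :
    pvIdx len x < len := by
  unfold pvIdx; split <;> omega

theorem pyIdx?_eq (len : Nat) (x : Int) (h1 : -(len : Int) ≤ x) (h2 : x < len) :
    PySem.List.pyIdx? len x = some (pvIdx len x) := by
  unfold PySem.List.pyIdx? pvIdx
  by_cases hx : x < 0
  · rw [if_neg (by omega), if_pos (by omega), if_pos hx]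
    congr 1; omega
  · rw [if_pos (by omega), if_pos h2, if_neg hx]

theorem pyGetD_pvIdx (xs : List Int) (x : Int) (d : Int) (h1 : -(xs.length : Int) ≤ x)
    (h2 : x < xs.length) : PySem.List.pyGetD xs x d = xs.getD (pvIdx xs.length x) d := by
  show ((PySem.List.pyIdx? xs.length x).bind (fun k => xs[k]?)).getD d = _
  rw [pyIdx?_eq xs.length x h1 h2]
  rfl

theorem pySetD_pvIdx (xs : List Int) (x : Int) (v : Int) (h1 : -(xs.length : Int) ≤ x)
    (h2 : x < xs.length) : PySem.List.pySetD xs x v = xs.set (pvIdx xs.length x) v := by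
  show ((PySem.List.pyIdx? xs.length x).map (fun k => xs.set k v)).getD xs = _
  rw [pyIdx?_eq xs.length x h1 h2]
  rfl

theorem findA_succ (f : Nat) (par : List Int) (x : Int) :
    findA (f+1) par x =
      if x ≠ PySem.List.pyGetD par x 0 then
        (PySem.List.pySetD (findA f par (PySem.List.pyGetD par x 0)).1 x
           (findA f par (PySem.List.pyGetD par x 0)).2,
         (findA f par (PySem.List.pyGetD par x 0)).2)
      else (par, PySem.List.pyGetD par x 0) := rfl

theorem findA_spec_nonneg :
    ∀ i : Nat, ∀ (f : Nat) (par : List Int), pvGood par → i < par.length → i < f →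
      (findA f par (i : Int)).2 = ((pvRoot par i : Nat) : Int)
      ∧ (findA f par (i : Int)).1.length = par.length
      ∧ pvGood (findA f par (i : Int)).1
      ∧ ∀ k, k < par.length → pvRoot (findA f par (i : Int)).1 k = pvRoot par k := by
  intro i
  induction i using Nat.strong_induction_on with
  | _ i ih =>
    intro f par hg hi hf
    match f, hf with
    | f+1, hf =>
      have hpx : PySem.List.pyGetD par ((i : Nat) : Int) 0 = par.getD i 0 :=
        PySem.List.pyGetD_natCast par i 0
      rw [findA_succ]
      by_cases hfix : pvP par i = i
      · have hgd : par.getD i 0 = ((i : Nat) : Int) := by rw [← pvP_cast par i hg hi, hfix]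
        rw [hpx, hgd, if_neg (by simp)]
        exact ⟨by rw [pvRoot_of_fix par i hg hi hfix], rfl, hg, fun k hk => rfl⟩
      · have hle := pvP_le par i hg hi
        have hplt : pvP par i < i := lt_of_le_of_ne hle hfix
        have hgd : par.getD i 0 = ((pvP par i : Nat) : Int) := (pvP_cast par i hg hi).symm
        have hne : ((i : Nat) : Int) ≠ ((pvP par i : Nat) : Int) := by
          intro h; exact hfix (by omega)
        rw [hpx, hgd, if_pos hne]
        obtain ⟨h2, hlen, hgood, hpres⟩ :=
          ih (pvP par i) hplt f par hg (lt_of_lt_of_le hplt (le_of_lt hi)) (by omega)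
        set R := findA f par ((pvP par i : Nat) : Int) with hR
        have hroot_i : pvRoot par i = pvRoot par (pvP par i) := by
          rw [pvRoot_unfold par i hg hi, if_neg hfix]
        have hRi : pvRoot R.1 i = pvRoot par i := hpres i hi
        have hilen : i < R.1.length := by omega
        have hset : PySem.List.pySetD R.1 ((i : Nat) : Int) R.2
            = R.1.set i ((pvRoot R.1 i : Nat) : Int) := by
          rw [h2, PySem.List.pySetD_natCast, hRi, hroot_i]
        have hgood2 : pvGood (R.1.set i ((pvRoot R.1 i : Nat) : Int)) :=
          pvGood_set _ i _ hgood hilen (by positivity)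
            (by exact_mod_cast pvRoot_le R.1 hgood i hilen)
        have hcomp := pvRoot_compress R.1 i hgood hilen
        refine ⟨by rw [h2, hroot_i], ?_, ?_, ?_⟩
        · show (PySem.List.pySetD R.1 _ R.2).length = _
          rw [hset, List.length_set, hlen]
        · show pvGood (PySem.List.pySetD R.1 _ R.2)
          rw [hset]; exact hgood2
        · intro k hk
          show pvRoot (PySem.List.pySetD R.1 _ R.2) k = _
          rw [hset, hcomp k (by omega), hpres k hk]

theorem findA_spec (par : List Int) (x : Int) (f : Nat) (hg : pvGood par)
    (h1 : -(par.length : Int) ≤ x) (h2 : x < par.length) (hf : par.length < f) :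
      (findA f par x).2 = ((pvRoot par (pvIdx par.length x) : Nat) : Int)
      ∧ (findA f par x).1.length = par.length
      ∧ pvGood (findA f par x).1
      ∧ ∀ k, k < par.length → pvRoot (findA f par x).1 k = pvRoot par k := by
  by_cases hx : 0 ≤ x
  · have hidx : pvIdx par.length x = x.toNat := by unfold pvIdx; rw [if_neg (by omega)]
    have hxi : x = ((x.toNat : Nat) : Int) := by omega
    rw [hidx, hxi]
    exact findA_spec_nonneg x.toNat f par hg (by omega) (by omega)
  · rw [not_le] at hx
    obtain ⟨f, rfl⟩ : ∃ f', f = f' + 1 := ⟨f - 1, by omega⟩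
    have hjlt : pvIdx par.length x < par.length := pvIdx_lt _ _ h1 h2
    set j := pvIdx par.length x with hj
    have hpx : PySem.List.pyGetD par x 0 = par.getD j 0 := pyGetD_pvIdx par x 0 h1 h2
    have hple := pvP_le par j hg hjlt
    have hgd : par.getD j 0 = ((pvP par j : Nat) : Int) := (pvP_cast par j hg hjlt).symm
    have hne : x ≠ ((pvP par j : Nat) : Int) := by
      intro h; omega
    rw [findA_succ, hpx, hgd, if_pos hne]
    obtain ⟨hr2, hlen, hgood, hpres⟩ :=
      findA_spec_nonneg (pvP par j) f par hg (lt_of_le_of_lt hple hjlt) (by omega)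
    set R := findA f par ((pvP par j : Nat) : Int) with hR
    have hroot_j : pvRoot par j = pvRoot par (pvP par j) := by
      by_cases hfix : pvP par j = j
      · rw [hfix]
      · rw [pvRoot_unfold par j hg hjlt, if_neg hfix]
    have hRj : pvRoot R.1 j = pvRoot par j := hpres j hjlt
    have hjlen : j < R.1.length := by omega
    have hset : PySem.List.pySetD R.1 x R.2 = R.1.set j ((pvRoot R.1 j : Nat) : Int) := by
      rw [hr2, pySetD_pvIdx R.1 x _ (by rw [hlen]; exact h1) (by rw [hlen]; exact h2)]
      rw [hlen, ← hj, hRj, hroot_j]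
    have hgood2 : pvGood (R.1.set j ((pvRoot R.1 j : Nat) : Int)) :=
      pvGood_set _ j _ hgood hjlen (by positivity)
        (by exact_mod_cast pvRoot_le R.1 hgood j hjlen)
    have hcomp := pvRoot_compress R.1 j hgood hjlen
    refine ⟨by rw [hr2, hroot_j], ?_, ?_, ?_⟩
    · show (PySem.List.pySetD R.1 _ R.2).length = _
      rw [hset, List.length_set, hlen]
    · show pvGood (PySem.List.pySetD R.1 _ R.2)
      rw [hset]; exact hgood2
    · intro k hk
      show pvRoot (PySem.List.pySetD R.1 _ R.2) k = _
      rw [hset, hcomp k (by omega), hpres k hk]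

theorem unionA_succ (f : Nat) (par : List Int) (a b : Int) :
    unionA f par a b =
      if (findA f par a).2 ≠ (findA f (findA f par a).1 b).2 then
        (if (findA f par a).2 < (findA f (findA f par a).1 b).2 then
          PySem.List.pySetD (findA f (findA f par a).1 b).1 (findA f (findA f par a).1 b).2 (findA f par a).2
        else
          PySem.List.pySetD (findA f (findA f par a).1 b).1 (findA f par a).2 (findA f (findA f par a).1 b).2)
      else (findA f (findA f par a).1 b).1 := rfl

theorem unionA_spec (par : List Int) (u v : Int) (f : Nat) (hg : pvGood par)
    (hu1 : -(par.length : Int) ≤ u) (hu2 : u < par.length)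
    (hv1 : -(par.length : Int) ≤ v) (hv2 : v < par.length) (hf : par.length < f) :
      (unionA f par u v).length = par.length
      ∧ pvGood (unionA f par u v)
      ∧ ∀ k, k < par.length →
          pvRoot (unionA f par u v) k =
            (if pvRoot par (pvIdx par.length u) = pvRoot par (pvIdx par.length v)
             then pvRoot par k
             else if pvRoot par k = max (pvRoot par (pvIdx par.length u)) (pvRoot par (pvIdx par.length v))
             then min (pvRoot par (pvIdx par.length u)) (pvRoot par (pvIdx par.length v))
             else pvRoot par k) := by
  obtain ⟨ha2, halen, hagood, hapres⟩ := findA_spec par u f hg hu1 hu2 hf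
  set A := findA f par u with hA
  have hv1' : -(A.1.length : Int) ≤ v := by rw [halen]; exact hv1
  have hv2' : v < A.1.length := by rw [halen]; exact hv2
  obtain ⟨hb2, hblen, hbgood, hbpres⟩ := findA_spec A.1 v f hagood hv1' hv2' (by omega)
  set B := findA f A.1 v with hB
  have hlenB : B.1.length = par.length := by rw [hblen, halen]
  set ru := pvRoot par (pvIdx par.length u) with hru
  set rv := pvRoot par (pvIdx par.length v) with hrv
  have hIdxA : pvIdx A.1.length v = pvIdx par.length v := by rw [halen]
  have hiu : pvIdx par.length u < par.length := pvIdx_lt _ _ hu1 hu2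
  have hiv : pvIdx par.length v < par.length := pvIdx_lt _ _ hv1 hv2
  have hruA : pvRoot A.1 (pvIdx par.length v) = rv := hapres _ hiv
  have hb2' : B.2 = ((rv : Nat) : Int) := by rw [hb2, hIdxA, hruA]
  have hpresAB : ∀ k, k < par.length → pvRoot B.1 k = pvRoot par k := fun k hk => by
    rw [hbpres k (by omega), hapres k hk]
  have hru_lt : ru < par.length := pvRoot_lt par _ hg hiu
  have hrv_lt : rv < par.length := pvRoot_lt par _ hg hiv
  have hruB : pvRoot B.1 ru = ru := by
    rw [hpresAB ru hru_lt, hru, pvRoot_idem par _ hg hiu]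
  have hrvB : pvRoot B.1 rv = rv := by
    rw [hpresAB rv hrv_lt, hrv, pvRoot_idem par _ hg hiv]
  have hfixu : pvP B.1 ru = ru := by
    have := pvRoot_fix B.1 hbgood ru (by omega)
    rwa [hruB] at this
  have hfixv : pvP B.1 rv = rv := by
    have := pvRoot_fix B.1 hbgood rv (by omega)
    rwa [hrvB] at this
  rw [unionA_succ]
  by_cases hcase : ru = rv
  · rw [ha2, hb2', if_neg (by simp [hcase])]
    exact ⟨hlenB, hbgood, fun k hk => by rw [if_pos hcase]; exact hpresAB k hk⟩
  · rcases Nat.lt_or_ge ru rv with hlt | hge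
    · rw [ha2, hb2', if_pos (by intro h; exact hcase (by exact_mod_cast h)),
          if_pos (by exact_mod_cast hlt), PySem.List.pySetD_natCast]
      have hlink := pvRoot_link B.1 rv ru hbgood (by omega) (by omega) hfixv hfixu hlt
      refine ⟨by rw [List.length_set, hlenB], ?_, ?_⟩
      · exact pvGood_set B.1 rv _ hbgood (by omega) (by positivity)
          (by exact_mod_cast le_of_lt hlt)
      · intro k hk
        rw [hlink k (by omega), hpresAB k hk, if_neg hcase,
            Nat.max_eq_right (le_of_lt hlt), Nat.min_eq_left (le_of_lt hlt)]
    · have hgt : rv < ru := lt_of_le_of_ne hge (fun h => hcase h.symm)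
      rw [ha2, hb2', if_pos (by intro h; exact hcase (by exact_mod_cast h)),
          if_neg (by intro h; exact absurd (by exact_mod_cast h : ru < rv) (by omega)),
          PySem.List.pySetD_natCast]
      have hlink := pvRoot_link B.1 ru rv hbgood (by omega) (by omega) hfixu hfixv hgt
      refine ⟨by rw [List.length_set, hlenB], ?_, ?_⟩
      · exact pvGood_set B.1 ru _ hbgood (by omega) (by positivity)
          (by exact_mod_cast le_of_lt hgt)
      · intro k hk
        rw [hlink k (by omega), hpresAB k hk, if_neg hcase,
            Nat.max_eq_left (le_of_lt hgt), Nat.min_eq_right (le_of_lt hgt)]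

theorem relabel_eq (r ru rv : Nat) (hne : ru ≠ rv) :
    (if (r : Int) = (ru : Nat) ∨ (r : Int) = (rv : Nat)
     then ((min ru rv : Nat) : Int) else ((r : Nat) : Int))
    = (((if r = max ru rv then min ru rv else r) : Nat) : Int) := by
  simp only [Nat.cast_inj]
  rcases le_total ru rv with hle | hle
  · rw [Nat.max_eq_right hle, Nat.min_eq_left hle]
    by_cases h : r = ru
    · subst h; rw [if_pos (Or.inl rfl), if_neg hne]
    · by_cases h2 : r = rv
      · subst h2; rw [if_pos (Or.inr rfl), if_pos rfl]
      · rw [if_neg (by tauto), if_neg h2]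
  · rw [Nat.max_eq_left hle, Nat.min_eq_right hle]
    by_cases h : r = ru
    · subst h; rw [if_pos (Or.inl rfl), if_pos rfl]
    · by_cases h2 : r = rv
      · subst h2; rw [if_pos (Or.inr rfl), if_neg (fun hh => hne hh.symm)]
      · rw [if_neg (by tauto), if_neg h]

theorem fold_inv (f : Nat) :
    ∀ (es : List (Int × Int)) (par lab : List Int),
      pvGood par → lab.length = par.length → par.length < f →
      (∀ p ∈ es, (-(par.length : Int) ≤ p.1 ∧ p.1 < par.length)
               ∧ (-(par.length : Int) ≤ p.2 ∧ p.2 < par.length)) →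
      (∀ k, k < par.length → lab.getD k 0 = ((pvRoot par k : Nat) : Int)) →
      pvGood (es.foldl (fun par uv => unionA f par uv.1 uv.2) par)
      ∧ (es.foldl (fun par uv => unionA f par uv.1 uv.2) par).length = par.length
      ∧ (es.foldl (fun lab uv =>
            let a := PySem.List.pyGetD lab uv.1 0
            let b := PySem.List.pyGetD lab uv.2 0
            if a ≠ b then
              let m := if a < b then a else b
              lab.map (fun x => if x = a ∨ x = b then m else x)
            else lab) lab).length = par.length
      ∧ ∀ k, k < par.length →
          (es.foldl (fun lab uv =>
            let a := PySem.List.pyGetD lab uv.1 0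
            let b := PySem.List.pyGetD lab uv.2 0
            if a ≠ b then
              let m := if a < b then a else b
              lab.map (fun x => if x = a ∨ x = b then m else x)
            else lab) lab).getD k 0
          = ((pvRoot (es.foldl (fun par uv => unionA f par uv.1 uv.2) par) k : Nat) : Int) := by
  intro es
  induction es with
  | nil =>
    intro par lab hg hlab hf hb hinv
    exact ⟨hg, rfl, hlab, hinv⟩
  | cons e es ih =>
    intro par lab hg hlab hf hb hinv
    obtain ⟨hbu, hbv⟩ := hb e (List.mem_cons_self ..)
    have hbrest := fun p hp => hb p (List.mem_cons_of_mem _ hp)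
    simp only [List.foldl_cons]
    obtain ⟨hUlen, hUgood, hUroot⟩ := unionA_spec par e.1 e.2 f hg hbu.1 hbu.2 hbv.1 hbv.2 hf
    set parU := unionA f par e.1 e.2 with hparU
    have hiu : pvIdx par.length e.1 < par.length := pvIdx_lt _ _ hbu.1 hbu.2
    have hiv : pvIdx par.length e.2 < par.length := pvIdx_lt _ _ hbv.1 hbv.2
    set ru := pvRoot par (pvIdx par.length e.1) with hru
    set rv := pvRoot par (pvIdx par.length e.2) with hrv
    have ha : PySem.List.pyGetD lab e.1 0 = ((ru : Nat) : Int) := by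
      rw [pyGetD_pvIdx lab e.1 0 (by rw [hlab]; exact hbu.1) (by rw [hlab]; exact hbu.2),
          hlab]
      exact hinv _ hiu
    have hbq : PySem.List.pyGetD lab e.2 0 = ((rv : Nat) : Int) := by
      rw [pyGetD_pvIdx lab e.2 0 (by rw [hlab]; exact hbv.1) (by rw [hlab]; exact hbv.2),
          hlab]
      exact hinv _ hiv
    by_cases hcase : ru = rv
    · have hstep :
          (let a := PySem.List.pyGetD lab e.1 0
           let b := PySem.List.pyGetD lab e.2 0
           if a ≠ b then
             let m := if a < b then a else b
             lab.map (fun x => if x = a ∨ x = b then m else x)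
           else lab) = lab := by
        show (if PySem.List.pyGetD lab e.1 0 ≠ PySem.List.pyGetD lab e.2 0 then _ else lab) = lab
        rw [ha, hbq, hcase, if_neg (by simp)]
      rw [hstep]
      have h5 : ∀ k, k < parU.length → lab.getD k 0 = ((pvRoot parU k : Nat) : Int) := by
        intro k hk
        rw [hUlen] at hk
        rw [hinv k hk, hUroot k hk, if_pos hcase]
      obtain ⟨g1, g2, g3, g4⟩ := ih parU lab hUgood (by rw [hlab, hUlen]) (by rw [hUlen]; exact hf)
        (fun p hp => by rw [hUlen]; exact hbrest p hp) h5
      exact ⟨g1, by rw [g2, hUlen], by rw [g3, hUlen],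
        fun k hk => g4 k (by rw [hUlen]; exact hk)⟩
    · have hm : (if ((ru : Nat) : Int) < ((rv : Nat) : Int) then ((ru : Nat) : Int) else ((rv : Nat) : Int))
          = ((min ru rv : Nat) : Int) := by
        rcases Nat.lt_or_ge ru rv with h | h
        · rw [if_pos (by exact_mod_cast h), Nat.min_eq_left (le_of_lt h)]
        · rw [if_neg (by exact_mod_cast not_lt.mpr h), Nat.min_eq_right h]
      have hstep :
          (let a := PySem.List.pyGetD lab e.1 0
           let b := PySem.List.pyGetD lab e.2 0
           if a ≠ b then
             let m := if a < b then a else b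
             lab.map (fun x => if x = a ∨ x = b then m else x)
           else lab)
          = lab.map (fun x => if x = ((ru : Nat) : Int) ∨ x = ((rv : Nat) : Int)
              then ((min ru rv : Nat) : Int) else x) := by
        show (if PySem.List.pyGetD lab e.1 0 ≠ PySem.List.pyGetD lab e.2 0 then
               lab.map (fun x => if x = PySem.List.pyGetD lab e.1 0 ∨ x = PySem.List.pyGetD lab e.2 0
                 then (if PySem.List.pyGetD lab e.1 0 < PySem.List.pyGetD lab e.2 0
                       then PySem.List.pyGetD lab e.1 0 else PySem.List.pyGetD lab e.2 0) else x)
              else lab) = _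
        rw [ha, hbq, if_pos (by intro h; exact hcase (by exact_mod_cast h)), hm]
      rw [hstep]
      have hlab'len : (lab.map (fun x => if x = ((ru : Nat) : Int) ∨ x = ((rv : Nat) : Int)
              then ((min ru rv : Nat) : Int) else x)).length = par.length := by
        rw [List.length_map, hlab]
      have h5 : ∀ k, k < parU.length → (lab.map (fun x => if x = ((ru : Nat) : Int) ∨ x = ((rv : Nat) : Int)
              then ((min ru rv : Nat) : Int) else x)).getD k 0 = ((pvRoot parU k : Nat) : Int) := by
        intro k hk
        rw [hUlen] at hk
        rw [List.getD_eq_getElem _ _ (by rw [hlab'len]; omega), List.getElem_map,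
            ← List.getD_eq_getElem lab 0 (by omega : k < lab.length), hinv k hk,
            hUroot k hk, if_neg hcase]
        exact relabel_eq (pvRoot par k) ru rv hcase
      obtain ⟨g1, g2, g3, g4⟩ := ih parU _ hUgood (by rw [hlab'len, hUlen]) (by rw [hUlen]; exact hf)
        (fun p hp => by rw [hUlen]; exact hbrest p hp) h5
      exact ⟨g1, by rw [g2, hUlen], by rw [g3, hUlen],
        fun k hk => g4 k (by rw [hUlen]; exact hk)⟩

theorem ans_fold (f : Nat) :
    ∀ (l : List Int) (par : List Int) (s : PySem.Set Int),
      pvGood par → par.length < f → (∀ i ∈ l, 0 ≤ i ∧ i < (par.length : Int)) →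
      (l.foldl (fun (st : List Int × PySem.Set Int) i =>
          let fr := findA f st.1 i
          (fr.1, PySem.Set.add st.2 fr.2)) (par, s)).2
      = l.foldl (fun s i => PySem.Set.add s ((pvRoot par i.toNat : Nat) : Int)) s := by
  intro l
  induction l with
  | nil => intro par s _ _ _; rfl
  | cons i l ih =>
    intro par s hg hf hb
    obtain ⟨hi0, hilt⟩ := hb i (List.mem_cons_self ..)
    obtain ⟨h2, hlen, hgood, hpres⟩ := findA_spec par i f hg (by omega) hilt hf
    have hidx : pvIdx par.length i = i.toNat := by unfold pvIdx; rw [if_neg (by omega)]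
    simp only [List.foldl_cons]
    show (l.foldl _ ((findA f par i).1, PySem.Set.add s (findA f par i).2)).2 = _
    have hb' : ∀ x ∈ l, 0 ≤ x ∧ x < ((findA f par i).1.length : Int) := fun x hx =>
      ⟨(hb x (List.mem_cons_of_mem _ hx)).1, by rw [hlen]; exact (hb x (List.mem_cons_of_mem _ hx)).2⟩
    rw [ih (findA f par i).1 (PySem.Set.add s (findA f par i).2) hgood (by rw [hlen]; exact hf) hb']
    rw [h2, hidx]
    exact PySem.List.foldl_congr_mem l _ _ _ (fun acc x hx => by
      rw [hpres x.toNat (by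
        have := (hb x (List.mem_cons_of_mem _ hx)).2
        have := (hb x (List.mem_cons_of_mem _ hx)).1
        omega)])

-- ===== VERDICT (by name: the statement is the Claim_ definition above) =====
theorem solution_spec : Claim_equal_solution := by
  intro n edges hdom hpre
  unfold Spec_solution
  by_cases hn : n < 0
  · have hedges : edges = [] := by
      cases edges with
      | nil => rfl
      | cons p es =>
        have := hpre p (List.mem_cons_self ..)
        exfalso; omega
    subst hedges
    unfold solution solution_alt
    rw [PySem.List.pyRange_one_eq_nil (by omega : (n + 1 : Int) ≤ 0),
        PySem.List.pyRange_one_eq_nil (by omega : (n + 1 : Int) ≤ 1)]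
    rfl
  · rw [not_lt] at hn
    unfold solution solution_alt
    set len := n.toNat + 1 with hlendef
    set f := n.toNat + 2 with hfdef
    set par0 := PySem.List.pyRange 0 (n+1) 1 with hpar0
    have hlen0 : par0.length = len := by
      rw [hpar0, PySem.List.length_pyRange_one]; omega
    have hget0 : ∀ k : Nat, k < len → par0.getD k 0 = (k : Int) := by
      intro k hk
      have h1 : par0.getD k 0 = (PySem.List.pyRange 0 (n+1) 1).getD k 0 := by rw [hpar0]
      have hkl : k < (PySem.List.pyRange 0 (n+1) 1).length := by
        rw [PySem.List.length_pyRange_one]; omega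
      rw [h1, List.getD_eq_getElem _ _ hkl, PySem.List.getElem_pyRange_one 0 (n+1) k hkl]
      ring
    have hgood0 : pvGood par0 := by
      intro i hi
      rw [hget0 i (by omega)]
      exact ⟨by positivity, le_refl _⟩
    have hroot0 : ∀ k, k < len → pvRoot par0 k = k := by
      intro k hk
      refine pvRoot_of_fix par0 k hgood0 (by omega) ?_
      unfold pvP; rw [hget0 k hk]; simp
    have hbounds : ∀ p ∈ edges,
        (-(par0.length : Int) ≤ p.1 ∧ p.1 < par0.length)
        ∧ (-(par0.length : Int) ≤ p.2 ∧ p.2 < par0.length) := by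
      intro p hp
      have := hpre p hp
      rw [hlen0]
      constructor <;> constructor <;> omega
    obtain ⟨hGf, hLf, hLlab, hInv⟩ := fold_inv f edges par0 par0 hgood0 rfl (by omega) hbounds
      (fun k hk => by rw [hlen0] at hk; rw [hget0 k hk, hroot0 k hk])
    set parF := edges.foldl (fun par uv => unionA f par uv.1 uv.2) par0 with hparF
    set labF := edges.foldl (fun lab uv =>
            let a := PySem.List.pyGetD lab uv.1 0
            let b := PySem.List.pyGetD lab uv.2 0
            if a ≠ b then
              let m := if a < b then a else b
              lab.map (fun x => if x = a ∨ x = b then m else x)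
            else lab) par0 with hlabF
    have hboundsAns : ∀ i ∈ PySem.List.pyRange 1 (n+1) 1, 0 ≤ i ∧ i < (parF.length : Int) := by
      intro i hi
      rw [PySem.List.mem_pyRange_one] at hi
      rw [hLf, hlen0]
      omega
    rw [ans_fold f (PySem.List.pyRange 1 (n+1) 1) parF PySem.Set.empty hGf
        (by rw [hLf, hlen0]; omega) hboundsAns]
    rw [← PySem.Set.update_map_eq_foldl_add,
        show PySem.Set.empty = ([] : PySem.Set Int) from rfl, PySem.Set.update_nil_left]
    show PySem.Set.ofList (List.map (fun i => ((pvRoot parF i.toNat : Nat) : Int))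
          (PySem.List.pyRange 1 (n+1) 1))
        = PySem.Set.ofList (PySem.List.slice labF (some 1) none)
    rw [PySem.List.slice_from labF (by omega : (0:Int) ≤ 1),
        show ((1:Int).toNat) = 1 from rfl]
    congr 1
    apply List.ext_getElem
    · rw [List.length_map, List.length_drop, PySem.List.length_pyRange_one, hLlab, hlen0]
      omega
    · intro k h1k h2k
      have h2k' : 1 + k < labF.length := by
        rw [List.length_drop] at h2k; omega
      rw [List.getElem_map, List.getElem_drop,
          ← List.getD_eq_getElem labF 0 h2k']
      rw [hInv _ (by rw [hLlab] at h2k'; rw [hlen0]; omega)]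
      have hkr : k < (PySem.List.pyRange 1 (n+1) 1).length := by
        rw [List.length_map] at h1k; exact h1k
      rw [PySem.List.getElem_pyRange_one 1 (n+1) k hkr]
      have : ((1 : Int) + (k : Nat)).toNat = 1 + k := by omega
      rw [this]
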